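-- pv_equiv track=rewrite | github.com/samihsq/slm-agentic-benchmarking | src/benchmarks/skills/instruction_following/word_instruction_following.py | L23_majority_duplicate_remove
-- ===== SOURCE A (Python) =====
-- def L23_majority_duplicate_remove(L):
--     if not L:
--         return L
--     counts={}
--     for x in L:
--         counts[x]=counts.get(x,0)+1
--     if max(counts.values()) > len(L)//2:
--         seen = set()
--         result = []
--         for x in L:
--             if x not in seen:
--                 seen.add(x)
--                 result.append(x)
--         return result
--     return L
-- ===== SOURCE B (Python) =====
-- def L23_majority_duplicate_remove(L):
--     if not L:
--         return L
--     candidate, count = None, 0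
--     for x in L:
--         if count == 0:
--             candidate = x
--             count = 1
--         elif x == candidate:
--             count += 1
--         else:
--             count -= 1
--     if L.count(candidate) > len(L) // 2:
--         return list(dict.fromkeys(L))
--     return L
-- ===== Notes on version B (the rewrite author's own statement) =====
-- stated objective: faster
-- what changed: Replaces the counts dictionary and max over its values by a single Boyer-Moore voting pass (candidate/count in O(1) extra state) plus one count of the candidate, and the seen-set dedupe loop by dict.fromkeys.
import Mathlib
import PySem

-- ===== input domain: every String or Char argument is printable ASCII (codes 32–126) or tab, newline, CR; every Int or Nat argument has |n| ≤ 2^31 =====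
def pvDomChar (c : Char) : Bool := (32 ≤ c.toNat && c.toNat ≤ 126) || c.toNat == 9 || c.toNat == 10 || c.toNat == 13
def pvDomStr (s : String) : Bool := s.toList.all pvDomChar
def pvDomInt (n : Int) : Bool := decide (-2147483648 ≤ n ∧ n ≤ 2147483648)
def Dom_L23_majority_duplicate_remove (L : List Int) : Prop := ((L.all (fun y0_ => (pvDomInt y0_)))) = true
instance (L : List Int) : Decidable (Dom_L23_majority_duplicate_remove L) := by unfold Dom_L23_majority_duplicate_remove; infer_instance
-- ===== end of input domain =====

-- B replaces A's counts-dictionary + max over its values by a Boyer-Moore voting pass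
-- plus one count of the candidate, and the seen-set dedupe loop by dict.fromkeys.


-- ===== PORT A =====
-- the body of A's seen-set dedupe loop
def dedStep (st : PySem.Set Int × List Int) (x : Int) : PySem.Set Int × List Int :=
  if PySem.Set.contains st.1 x then st
  else (PySem.Set.add st.1 x, st.2 ++ [x])

def L23_majority_duplicate_remove (L : List Int) : List Int :=
  if L = [] then L
  else
    let counts := L.foldl (fun d x => d.insert x (d.getD x 0 + 1)) PySem.Dict.empty
    match PySem.List.max? counts.values (fun v => v) with
    | none => L  -- unreachable (L ≠ [] gives a nonempty values list); max([]) would raise only here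
    | some m =>
      if m > PySem.Int.floordiv (L.length : Int) 2 then
        (L.foldl dedStep (PySem.Set.empty, [])).2
      else L

-- ===== PORT B =====
-- Boyer-Moore voting step; the Python's initial candidate None is ported as 0: it is
-- overwritten before it is ever compared (count = 0 when the first element arrives).
def bmStep (p : Int × Int) (x : Int) : Int × Int :=
  if p.2 = 0 then (x, 1)
  else if x = p.1 then (p.1, p.2 + 1)
  else (p.1, p.2 - 1)

def L23_majority_duplicate_remove_alt (L : List Int) : List Int :=
  if L = [] then L
  else
    let r := L.foldl bmStep (0, 0)
    if (L.count r.1 : Int) > PySem.Int.floordiv (L.length : Int) 2 then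
      PySem.List.dedup L
    else L

-- ===== PRECONDITION & SPEC =====
def Spec_L23_majority_duplicate_remove (L : List Int) (out : List Int) : Prop := out = L23_majority_duplicate_remove_alt L
instance (L : List Int) (out : List Int) : Decidable (Spec_L23_majority_duplicate_remove L out) := by unfold Spec_L23_majority_duplicate_remove; infer_instance

-- ===== CLAIM (what is proved, stated in full; the proofs are below) =====
def Claim_equal_L23_majority_duplicate_remove : Prop := ∀ (L : List Int), Dom_L23_majority_duplicate_remove L → Spec_L23_majority_duplicate_remove L (L23_majority_duplicate_remove L)

-- ===== LEMMAS AND PROOFS =====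

-- A's dedupe loop keeps seen and result equal as lists, so it computes Set.update.
lemma ded_pair (L : List Int) : ∀ s : List Int,
    L.foldl dedStep (s, s) = (PySem.Set.update s L, PySem.Set.update s L) := by
  induction L with
  | nil => intro s; simp [PySem.Set.update]
  | cons x t ih =>
    intro s
    rw [List.foldl_cons, PySem.Set.update_cons]
    by_cases h : x ∈ s
    · simp [dedStep, h, ih]
    · simp [dedStep, h, ih]

-- Boyer-Moore invariant: for every v other than the current candidate, twice its
-- count plus the initial credit (for v = c) plus the final count is at most length + credit.
lemma bm_inv (L : List Int) : ∀ c k : Int, 0 ≤ k →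
    0 ≤ (L.foldl bmStep (c, k)).2 ∧
    ∀ v : Int, v ≠ (L.foldl bmStep (c, k)).1 →
      2 * (L.count v : Int) + (if v = c then 2 * k else 0) + (L.foldl bmStep (c, k)).2
        ≤ (L.length : Int) + k := by
  induction L with
  | nil =>
    intro c k hk
    simp only [List.foldl_nil]
    refine ⟨hk, ?_⟩
    intro v hv
    simp only [List.count_nil, List.length_nil]
    split_ifs with h
    · exact absurd h hv
    · omega
  | cons x t ih =>
    intro c k hk
    have hcnt : ∀ v : Int, ((x :: t).count v : Int) = (t.count v : Int) + (if x = v then 1 else 0) := by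
      intro v
      rw [List.count_cons]
      simp only [beq_iff_eq]
      split_ifs <;> push_cast <;> ring
    by_cases h0 : k = 0
    · subst h0
      have step : bmStep (c, 0) x = (x, 1) := by simp [bmStep]
      rw [List.foldl_cons, step]
      obtain ⟨h1, h2⟩ := ih x 1 (by omega)
      refine ⟨h1, ?_⟩
      intro v hv
      have h3 := h2 v hv
      rw [hcnt v]
      simp only [List.length_cons]
      push_cast at h3 ⊢
      split_ifs at h3 ⊢ <;> omega
    · by_cases hx : x = c
      · subst hx
        have step : bmStep (x, k) x = (x, k + 1) := by simp [bmStep, h0]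
        rw [List.foldl_cons, step]
        obtain ⟨h1, h2⟩ := ih x (k + 1) (by omega)
        refine ⟨h1, ?_⟩
        intro v hv
        have h3 := h2 v hv
        rw [hcnt v]
        simp only [List.length_cons]
        push_cast at h3 ⊢
        split_ifs at h3 ⊢ <;> omega
      · have step : bmStep (c, k) x = (c, k - 1) := by simp [bmStep, h0, hx]
        rw [List.foldl_cons, step]
        obtain ⟨h1, h2⟩ := ih c (k - 1) (by omega)
        refine ⟨h1, ?_⟩
        intro v hv
        have h3 := h2 v hv
        rw [hcnt v]
        simp only [List.length_cons]
        push_cast at h3 ⊢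
        split_ifs at h3 ⊢ <;> omega

-- a strict majority element is the final Boyer-Moore candidate
lemma bm_majority (L : List Int) (v : Int) (hv : (L.length : Int) < 2 * (L.count v : Int)) :
    v = (L.foldl bmStep (0, 0)).1 := by
  by_contra hne
  obtain ⟨h1, h2⟩ := bm_inv L 0 0 le_rfl
  have h3 := h2 v hne
  split_ifs at h3 <;> omega

-- the values of A's counts dict are the counts of the distinct elements of L
lemma values_counter (L : List Int) :
    (L.foldl (fun d x => d.insert x (d.getD x 0 + 1)) PySem.Dict.empty).values
      = (PySem.Set.ofList L).map (fun k => (L.count k : Int)) := by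
  rw [PySem.Dict.foldl_insert_getD_add_one_eq_counter]
  calc (PySem.Dict.counter L).values
      = (PySem.Dict.counter L).items.map (·.2) := rfl
    _ = ((PySem.Set.ofList L).map (fun k => (k, (L.count k : Int)))).map (·.2) := by
        rw [PySem.Dict.items_counter]
    _ = (PySem.Set.ofList L).map (fun k => (L.count k : Int)) := by
        rw [List.map_map]; rfl

lemma floordiv_two (n m : Int) :
    (PySem.Int.floordiv n 2 < m) ↔ (n < 2 * m) := by
  have h : PySem.Int.floordiv n 2 = n / 2 := by
    unfold PySem.Int.floordiv
    rw [Int.fdiv_eq_ediv]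
    simp
  rw [h]; omega

-- ===== VERDICT (by name: the statement is the Claim_ definition above) =====
theorem L23_majority_duplicate_remove_spec : Claim_equal_L23_majority_duplicate_remove := by
  intro L _
  unfold Spec_L23_majority_duplicate_remove L23_majority_duplicate_remove L23_majority_duplicate_remove_alt
  by_cases hnil : L = []
  · simp [hnil]
  · simp only [hnil, if_false]
    rw [values_counter]
    have hvne : (PySem.Set.ofList L).map (fun k => (L.count k : Int)) ≠ [] := by
      obtain ⟨a, t, rfl⟩ := List.exists_cons_of_ne_nil hnil
      have hmem : a ∈ PySem.Set.ofList (a :: t) :=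
        (PySem.Set.mem_ofList _ _).mpr (by simp)
      simp only [ne_eq, List.map_eq_nil_iff]
      intro h; rw [h] at hmem; exact absurd hmem (List.not_mem_nil)
    obtain ⟨m, hm⟩ : ∃ m, PySem.List.max? ((PySem.Set.ofList L).map (fun k => (L.count k : Int))) (fun v => v) = some m := by
      cases hmm : PySem.List.max? ((PySem.Set.ofList L).map (fun k => (L.count k : Int))) (fun v => v)
      · exact absurd ((PySem.List.max?_eq_none_iff _ _).mp hmm) hvne
      · exact ⟨_, rfl⟩
    simp only [hm]
    set cand := (L.foldl bmStep (0, 0)).1 with hcand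
    have hiff : (PySem.Int.floordiv (L.length : Int) 2 < m) ↔
        (PySem.Int.floordiv (L.length : Int) 2 < (L.count cand : Int)) := by
      constructor
      · intro h
        obtain ⟨w, hw, rfl⟩ := List.mem_map.mp (PySem.List.max?_mem hm)
        have hwc : w = cand := bm_majority L w ((floordiv_two _ _).mp h)
        rwa [← hwc]
      · intro h
        have h2 : (L.length : Int) < 2 * (L.count cand : Int) := (floordiv_two _ _).mp h
        have hpos : 0 < L.count cand := by
          rcases Nat.eq_zero_or_pos (L.count cand) with hz | hp
          · exfalso; rw [hz] at h2; simp at h2; omega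
          · exact hp
        have hcm : cand ∈ L := List.count_pos_iff.mp hpos
        have hin : (L.count cand : Int) ∈ (PySem.Set.ofList L).map (fun k => (L.count k : Int)) :=
          List.mem_map.mpr ⟨cand, (PySem.Set.mem_ofList _ _).mpr hcm, rfl⟩
        have hle := PySem.List.max?_isMax hm _ hin
        simp only at hle
        omega
    by_cases hcond : PySem.Int.floordiv (L.length : Int) 2 < m
    · rw [if_pos hcond, if_pos (hiff.mp hcond)]
      have hd := congrArg Prod.snd (ded_pair L [])
      simp only at hd
      calc (L.foldl dedStep (PySem.Set.empty, [])).2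
          = (L.foldl dedStep (([] : List Int), ([] : List Int))).2 := rfl
        _ = PySem.Set.update ([] : List Int) L := hd
        _ = PySem.List.dedup L := by rw [PySem.Set.update_nil_left]; simp
    · rw [if_neg hcond, if_neg (fun h => hcond (hiff.mpr h))]
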